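-- pv_equiv track=rewrite | github.com/Hoponga/2026-NVIDIA | team-submissions/qe_mts.py | tabu_search
-- ===== SOURCE A (Python) =====
-- import copy
-- import copy
--
-- def calculate_energy(s: list[int], N: int):
--     '''
--     Calculates the energy (E) of a bitstring s for the LABS problem.
--     s: List of integers, e.g., [0, 0, 1, 0]
--     Mapping: 0 -> -1, 1 -> 1
--     '''
--     # Safety check: if list is shorter than N, pad with 0s (leading zeros)
--     # This fixes the issue if an incomplete list is ever passed
--     if len(s) < N:
--         s = [0] * (N - len(s)) + s
--
--     # Convert 0/1 to -1/+1
--     # 0 becomes -1, 1 becomes 1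
--     sequence = [2*x - 1 for x in s]
--
--     energy = 0
--     # C_k calculation (Autocorrelation)
--     for k in range(1, N):
--         c_k = 0
--         for i in range(N - k):
--             c_k += sequence[i] * sequence[i + k]
--         energy += c_k**2
--
--     return energy
--
-- def tabu_search(N: int, s: list[int], max_iters=100, tabu_tenure=5):
--     '''
--     Performs a greedy local search with a Tabu list mechanism.
--     '''
--     current_s = copy.deepcopy(s)
--     best_s = copy.deepcopy(s)
--     best_energy = calculate_energy(current_s, N)
--
--     # Tabu list stores INDICES of bits that were recently flipped
--     tabu_list = []
--
--     for _ in range(max_iters):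
--         local_best_neighbor = None
--         local_best_energy = float('inf')
--         move_index = -1
--
--         # 1. Evaluate all 1-bit flip neighbors
--         for i in range(N):
--             # Create neighbor efficiently
--             # We modify current_s temporarily to check energy, then flip back
--             # This is faster than deepcopying N times
--             current_s[i] ^= 1 # Flip
--             neighbor_energy = calculate_energy(current_s, N)
--
--             # 2. Check Tabu conditions
--             is_tabu = i in tabu_list
--             is_aspiration = neighbor_energy < best_energy
--
--             if (not is_tabu) or is_aspiration:
--                 if neighbor_energy < local_best_energy:
--                     local_best_energy = neighbor_energy
--                     move_index = i
--                     # We must copy here to save the configuration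
--                     local_best_neighbor = copy.deepcopy(current_s)
--
--             current_s[i] ^= 1 # Flip back (Revert)
--
--         # 3. Make the move if a valid neighbor was found
--         if local_best_neighbor is not None:
--             current_s = local_best_neighbor
--
--             # Update Global Best
--             if local_best_energy < best_energy:
--                 best_energy = local_best_energy
--                 best_s = copy.deepcopy(current_s)
--
--             # Update Tabu List
--             tabu_list.append(move_index)
--             if len(tabu_list) > tabu_tenure:
--                 tabu_list.pop(0)
--
--     return best_s
-- ===== SOURCE B (Python) =====
-- def tabu_search(N, s, max_iters=100, tabu_tenure=5):
--     '''Tabu local search for LABS; evaluates each 1-bit flip in O(N) via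
--     autocorrelation deltas instead of a full O(N^2) energy recompute.'''
--     current_s = list(s)
--     best_s = list(s)
--     seq = [2 * x - 1 for x in current_s]
--     # autocorrelations C_k, k = 1..N-1, over the first N entries
--     C = [sum(seq[i] * seq[i + k] for i in range(N - k)) for k in range(1, N)]
--     best_energy = sum(c * c for c in C)
--     tabu_list = []
--
--     for _ in range(max_iters):
--         move_index = -1
--         local_best_energy = None
--
--         for i in range(N):
--             # flipping bit i changes seq[i] by d; each C_k changes linearly
--             d = 2 * ((current_s[i] ^ 1) - current_s[i])
--             e = 0
--             for idx in range(N - 1):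
--                 k = idx + 1
--                 w = (seq[i + k] if i + k < N else 0) + (seq[i - k] if i - k >= 0 else 0)
--                 ck = C[idx] + d * w
--                 e += ck * ck
--
--             if (i not in tabu_list) or (e < best_energy):
--                 if local_best_energy is None or e < local_best_energy:
--                     local_best_energy = e
--                     move_index = i
--
--         if move_index != -1:
--             current_s[move_index] ^= 1
--             seq = [2 * x - 1 for x in current_s]
--             C = [sum(seq[i] * seq[i + k] for i in range(N - k)) for k in range(1, N)]
--             if local_best_energy < best_energy:
--                 best_energy = local_best_energy
--                 best_s = list(current_s)
--             tabu_list.append(move_index)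
--             if len(tabu_list) > tabu_tenure:
--                 tabu_list.pop(0)
--
--     return best_s
-- ===== Notes on version B (the rewrite author's own statement) =====
-- stated objective: faster
-- what changed: B stores the autocorrelation vector C of the current configuration and scores each 1-bit-flip neighbour in O(N) via the linear flip delta on each C_k (and rebuilds C once per accepted move), instead of A's full O(N^2) energy recomputation for every neighbour.
-- outside the precondition, e.g. on tabu_search(2, [0], 0, 5): A returns [0], B raises IndexError
import Mathlib
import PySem

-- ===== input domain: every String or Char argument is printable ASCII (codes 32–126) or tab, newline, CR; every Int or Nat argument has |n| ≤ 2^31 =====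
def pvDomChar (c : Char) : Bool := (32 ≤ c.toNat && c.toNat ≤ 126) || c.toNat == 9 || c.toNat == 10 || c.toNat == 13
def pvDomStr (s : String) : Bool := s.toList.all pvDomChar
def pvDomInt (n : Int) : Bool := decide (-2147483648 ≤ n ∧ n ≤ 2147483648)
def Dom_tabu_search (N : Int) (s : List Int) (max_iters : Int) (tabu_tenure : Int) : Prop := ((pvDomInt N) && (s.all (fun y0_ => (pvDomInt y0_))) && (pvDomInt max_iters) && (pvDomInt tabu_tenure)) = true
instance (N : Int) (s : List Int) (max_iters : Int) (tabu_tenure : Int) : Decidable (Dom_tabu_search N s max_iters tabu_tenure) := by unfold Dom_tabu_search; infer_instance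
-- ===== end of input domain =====

-- B evaluates each 1-bit-flip neighbour in O(N) from the stored autocorrelation
-- vector (flip delta) instead of A's full O(N^2) energy recompute per neighbour.

-- ===== PORT A =====

-- current_s[i] ^= 1 (both Pythons perform this flip; Python int xor = PySem.Int.bxor)
def pvFlip (cur : List Int) (i : Int) : List Int :=
  PySem.List.pySetD cur i (PySem.Int.bxor (PySem.List.pyGetD cur i 0) 1)

-- indices are always in range in Python (after the padding branch), so pyGetD is exact
def calculate_energy (s : List Int) (N : Int) : Int :=
  let s2 := if (s.length : Int) < N then List.replicate (N - (s.length : Int)).toNat 0 ++ s else s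
  let sequence := s2.map (fun x => 2 * x - 1)
  (PySem.List.pyRange 1 N 1).foldl
    (fun energy k =>
      energy +
        ((PySem.List.pyRange 0 (N - k) 1).foldl
           (fun c i => c + PySem.List.pyGetD sequence i 0 * PySem.List.pyGetD sequence (i + k) 0) 0) ^ 2)
    0

-- A's inner neighbour loop; state = (local_best_neighbor, local_best_energy, move_index),
-- local_best_energy = none models float('inf')
def pvInnerA (N : Int) (cur : List Int) (bestE : Int) (tabu : List Int) :
    Option (List Int) × Option Int × Int :=
  (PySem.List.pyRange 0 N 1).foldl
    (fun acc i =>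
      let cur' := pvFlip cur i
      let ne := calculate_energy cur' N
      let is_tabu := tabu.contains i
      let is_asp := decide (ne < bestE)
      if !is_tabu || is_asp then
        if (match acc.2.1 with | none => true | some e => decide (ne < e)) then
          (some cur', some ne, i)
        else acc
      else acc)
    (none, none, -1)

def tabu_search (N : Int) (s : List Int) (max_iters : Int) (tabu_tenure : Int) : List Int :=
  let st := (PySem.List.pyRange 0 max_iters 1).foldl
    (fun st _ =>
      let cur := st.1
      let best := st.2.1
      let bestE := st.2.2.1
      let tabu := st.2.2.2
      let r := pvInnerA N cur bestE tabu
      match r.1, r.2.1 with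
      | some nb, some lbe =>
          let best2 := if lbe < bestE then nb else best
          let bestE2 := if lbe < bestE then lbe else bestE
          let tabu2 := tabu ++ [r.2.2]
          let tabu3 := if tabu_tenure < (tabu2.length : Int) then tabu2.tail else tabu2
          (nb, best2, bestE2, tabu3)
      | _, _ => st)
    (s, s, calculate_energy s N, ([] : List Int))
  st.2.1

-- ===== PORT B =====

def pvSeqOf (l : List Int) : List Int := l.map (fun x => 2 * x - 1)

-- C = [sum(seq[i]*seq[i+k] for i in range(N-k)) for k in range(1, N)]
def pvCorr (seq : List Int) (N : Int) : List Int :=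
  (PySem.List.pyRange 1 N 1).map (fun k =>
    ((PySem.List.pyRange 0 (N - k) 1).map
        (fun i => PySem.List.pyGetD seq i 0 * PySem.List.pyGetD seq (i + k) 0)).sum)

-- O(N) neighbour energy: each C_k is linear in seq[i], so flipping bit i shifts C_k by d*w
def pvNeighborE (N : Int) (cur seq C : List Int) (i : Int) : Int :=
  let d := 2 * (PySem.Int.bxor (PySem.List.pyGetD cur i 0) 1 - PySem.List.pyGetD cur i 0)
  (PySem.List.pyRange 0 (N - 1) 1).foldl
    (fun e idx =>
      let k := idx + 1
      let w := (if i + k < N then PySem.List.pyGetD seq (i + k) 0 else 0) +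
               (if 0 ≤ i - k then PySem.List.pyGetD seq (i - k) 0 else 0)
      let ck := PySem.List.pyGetD C idx 0 + d * w
      e + ck * ck)
    0

-- B's inner loop; state = (move_index, local_best_energy)
def pvInnerB (N : Int) (cur seq C : List Int) (bestE : Int) (tabu : List Int) :
    Int × Option Int :=
  (PySem.List.pyRange 0 N 1).foldl
    (fun acc i =>
      let e := pvNeighborE N cur seq C i
      if !(tabu.contains i) || decide (e < bestE) then
        if (match acc.2 with | none => true | some e0 => decide (e < e0)) then (i, some e)
        else acc
      else acc)
    (-1, none)

def tabu_search_alt (N : Int) (s : List Int) (max_iters : Int) (tabu_tenure : Int) : List Int :=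
  let seq0 := pvSeqOf s
  let C0 := pvCorr seq0 N
  let bestE0 := (C0.map (fun c => c * c)).sum
  let st := (PySem.List.pyRange 0 max_iters 1).foldl
    (fun st _ =>
      let cur := st.1
      let best := st.2.1
      let seq := st.2.2.1
      let C := st.2.2.2.1
      let bestE := st.2.2.2.2.1
      let tabu := st.2.2.2.2.2
      let r := pvInnerB N cur seq C bestE tabu
      if r.1 ≠ -1 then
        match r.2 with
        | some lbe =>
            let cur2 := pvFlip cur r.1
            let seq2 := pvSeqOf cur2
            let C2 := pvCorr seq2 N
            let best2 := if lbe < bestE then cur2 else best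
            let bestE2 := if lbe < bestE then lbe else bestE
            let tabu2 := tabu ++ [r.1]
            let tabu3 := if tabu_tenure < (tabu2.length : Int) then tabu2.tail else tabu2
            (cur2, best2, seq2, C2, bestE2, tabu3)
        | none => st      -- unreachable: move_index ≠ -1 only when an energy was recorded
      else st)
    (s, s, seq0, C0, bestE0, ([] : List Int))
  st.2.1

-- ===== PRECONDITION & SPEC =====
-- Pre_ restricts to the natural domain N ≤ len(s): on shorter lists A raises IndexError
-- whenever the loop runs (max_iters ≥ 1); when max_iters ≤ 0 A returns s unused, but such
-- truncated inputs are malformed for LABS and B's eager autocorrelation pass raises there.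
def Pre_tabu_search (N : Int) (s : List Int) (max_iters : Int) (tabu_tenure : Int) : Prop :=
  N ≤ (s.length : Int)
instance (N : Int) (s : List Int) (max_iters : Int) (tabu_tenure : Int) : Decidable (Pre_tabu_search N s max_iters tabu_tenure) := by unfold Pre_tabu_search; infer_instance

def pvWitness_tabu_search : Int × List Int × Int × Int := (4, [0, 1, 1, 0], 3, 2)

def Spec_tabu_search (N : Int) (s : List Int) (max_iters : Int) (tabu_tenure : Int) (out : List Int) : Prop := out = tabu_search_alt N s max_iters tabu_tenure
instance (N : Int) (s : List Int) (max_iters : Int) (tabu_tenure : Int) (out : List Int) : Decidable (Spec_tabu_search N s max_iters tabu_tenure out) := by unfold Spec_tabu_search; infer_instance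

-- ===== CLAIM (what is proved, stated in full; the proofs are below) =====
def Claim_equal_tabu_search : Prop := ∀ (N : Int) (s : List Int) (max_iters : Int) (tabu_tenure : Int), Dom_tabu_search N s max_iters tabu_tenure → Pre_tabu_search N s max_iters tabu_tenure → Spec_tabu_search N s max_iters tabu_tenure (tabu_search N s max_iters tabu_tenure)

-- ===== LEMMAS AND PROOFS =====

theorem list_range_sum (m : ℕ) (g : ℕ → ℤ) :
    ((List.range m).map g).sum = ∑ j ∈ Finset.range m, g j := rfl
def pvCk (u : List Int) (n k : ℕ) : ℤ :=
  ∑ j ∈ Finset.range (n - k), u.getD j 0 * u.getD (j + k) 0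
theorem pvInnerSum_eq (u : List Int) (N k : Int) (hk : 0 ≤ k) (hN : 0 ≤ N) :
    (PySem.List.pyRange 0 (N - k) 1).foldl
      (fun c i => c + PySem.List.pyGetD u i 0 * PySem.List.pyGetD u (i + k) 0) 0
      = pvCk u N.toNat k.toNat := by
  rw [PySem.List.foldl_add, PySem.List.pyRange_one, List.map_map]
  have hm : (N - k - 0).toNat = N.toNat - k.toNat := by omega
  rw [hm, zero_add, list_range_sum]
  unfold pvCk
  apply Finset.sum_congr rfl
  intro j _
  simp only [Function.comp_apply, zero_add]
  have h2 : (j : Int) + k = ((j + k.toNat : ℕ) : Int) := by push_cast; omega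
  rw [h2, PySem.List.pyGetD_natCast, PySem.List.pyGetD_natCast]
theorem pv_calc_eq (s : List Int) (N : Int) (hlen : N ≤ (s.length : Int)) :
    calculate_energy s N
      = ∑ m ∈ Finset.range (N.toNat - 1), (pvCk (pvSeqOf s) N.toNat (m + 1)) ^ 2 := by
  unfold calculate_energy
  rw [if_neg (by omega)]
  by_cases hN : 0 ≤ N
  · rw [PySem.List.foldl_add, PySem.List.pyRange_one, List.map_map]
    have hm : (N - 1).toNat = N.toNat - 1 := by omega
    rw [hm, zero_add, list_range_sum]
    apply Finset.sum_congr rfl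
    intro m _
    simp only [Function.comp_apply]
    rw [show ((1 : Int) + (m : ℕ)) = (((m + 1 : ℕ) : Int)) from by push_cast; ring]
    rw [pvInnerSum_eq (s.map fun x => 2*x-1) N ((m+1 : ℕ) : Int) (by positivity) hN]
    show (pvCk (pvSeqOf s) N.toNat ((m+1:ℕ):Int).toNat)^2 = _
    norm_num [pvSeqOf]
  · rw [PySem.List.pyRange_one_eq_nil (by omega)]
    have : N.toNat - 1 = 0 := by omega
    simp [this]
theorem pvMapSum_eq (u : List Int) (N k : Int) (hk : 0 ≤ k) (hN : 0 ≤ N) :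
    ((PySem.List.pyRange 0 (N - k) 1).map
        (fun i => PySem.List.pyGetD u i 0 * PySem.List.pyGetD u (i + k) 0)).sum
      = pvCk u N.toNat k.toNat := by
  have h := pvInnerSum_eq u N k hk hN
  rw [PySem.List.foldl_add, zero_add] at h
  exact h
theorem pvCorr_getD (u : List Int) (N : Int) (m : ℕ) (hm : (m : Int) < N - 1) :
    PySem.List.pyGetD (pvCorr u N) (m : Int) 0 = pvCk u N.toNat (m + 1) := by
  unfold pvCorr
  rw [PySem.List.pyGetD_map_pyRange_one _ 1 N m 0 (by omega)]
  rw [show ((1 : Int) + (m : ℕ)) = (((m + 1 : ℕ) : Int)) from by push_cast; ring]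
  rw [pvMapSum_eq u N _ (by positivity) (by omega)]
  norm_num
theorem getD_set_ne (u : List ℤ) (i j : ℕ) (v : ℤ) (h : j ≠ i) :
    (u.set i v).getD j 0 = u.getD j 0 := by
  simp [List.getD, List.getElem?_set_ne (Ne.symm h)]
theorem getD_set_self (u : List ℤ) (i : ℕ) (v : ℤ) (h : i < u.length) :
    (u.set i v).getD i 0 = v := by
  simp [List.getD, h]
theorem pvCk_set (u : List Int) (n i K : ℕ) (v : ℤ) (hn : n ≤ u.length) (hi : i < n) (hK : 0 < K) :
    pvCk (u.set i v) n K
      = pvCk u n K + (v - u.getD i 0) *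
          ((if i + K < n then u.getD (i + K) 0 else 0) +
           (if K ≤ i then u.getD (i - K) 0 else 0)) := by
  unfold pvCk
  have key : ∀ j ∈ Finset.range (n - K),
      (u.set i v).getD j 0 * (u.set i v).getD (j + K) 0
        = u.getD j 0 * u.getD (j + K) 0
          + ((if j = i then (v - u.getD i 0) * u.getD (i + K) 0 else 0)
             + (if j + K = i then (v - u.getD i 0) * u.getD (i - K) 0 else 0)) := by
    intro j hj
    simp only [Finset.mem_range] at hj
    by_cases h1 : j = i
    · subst h1
      rw [getD_set_self u j v (by omega), getD_set_ne u j (j + K) v (by omega)]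
      rw [if_pos rfl, if_neg (by omega)]
      ring
    · by_cases h2 : j + K = i
      · rw [getD_set_ne u i j v h1]
        rw [h2, getD_set_self u i v (by omega)]
        rw [if_neg h1, if_pos rfl]
        have : i - K = j := by omega
        rw [this]
        ring
      · rw [getD_set_ne u i j v h1, getD_set_ne u i (j + K) v h2]
        rw [if_neg h1, if_neg h2]
        ring
  rw [Finset.sum_congr rfl key, Finset.sum_add_distrib, Finset.sum_add_distrib]
  congr 1
  rw [Finset.sum_ite_eq' (Finset.range (n - K)) i (fun _ => (v - u.getD i 0) * u.getD (i + K) 0)]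
  by_cases hcase : i + K < n
  · rw [if_pos (by simp; omega), if_pos hcase]
    by_cases hK2 : K ≤ i
    · have : ∀ j ∈ Finset.range (n - K), (if j + K = i then (v - u.getD i 0) * u.getD (i - K) 0 else 0) = (if j = i - K then (v - u.getD i 0) * u.getD (i - K) 0 else 0) := by
        intro j hj; congr 1; simp; omega
      rw [Finset.sum_congr rfl this, Finset.sum_ite_eq' (Finset.range (n - K)) (i - K) (fun _ => (v - u.getD i 0) * u.getD (i - K) 0)]
      rw [if_pos (by simp; omega), if_pos hK2]
      ring
    · have : ∀ j ∈ Finset.range (n - K), (if j + K = i then (v - u.getD i 0) * u.getD (i - K) 0 else 0) = 0 := by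
        intro j hj; rw [if_neg (by omega)]
      rw [Finset.sum_congr rfl this, Finset.sum_const_zero, if_neg hK2]
      ring
  · rw [if_neg (by simp; omega), if_neg hcase]
    by_cases hK2 : K ≤ i
    · have : ∀ j ∈ Finset.range (n - K), (if j + K = i then (v - u.getD i 0) * u.getD (i - K) 0 else 0) = (if j = i - K then (v - u.getD i 0) * u.getD (i - K) 0 else 0) := by
        intro j hj; congr 1; simp; omega
      rw [Finset.sum_congr rfl this, Finset.sum_ite_eq' (Finset.range (n - K)) (i - K) (fun _ => (v - u.getD i 0) * u.getD (i - K) 0)]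
      by_cases hmem : i - K < n - K
      · -- i - K < n - K with K ≤ i means i < n ✓ always true here actually
        rw [if_pos (by simp; omega), if_pos hK2]; ring
      · omega
    · have : ∀ j ∈ Finset.range (n - K), (if j + K = i then (v - u.getD i 0) * u.getD (i - K) 0 else 0) = 0 := by
        intro j hj; rw [if_neg (by omega)]
      rw [Finset.sum_congr rfl this, Finset.sum_const_zero, if_neg hK2]
      ring
theorem pvSeq_getD (cur : List Int) (j : ℕ) (hj : j < cur.length) :
    (pvSeqOf cur).getD j 0 = 2 * cur.getD j 0 - 1 := by
  unfold pvSeqOf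
  rw [List.getD_eq_getElem _ _ (by simpa using hj), List.getD_eq_getElem _ _ hj]
  simp
theorem pv_energy_flip (N : Int) (cur : List Int) (hlen : N ≤ (cur.length : Int))
    (i : Int) (hi0 : 0 ≤ i) (hiN : i < N) :
    calculate_energy (pvFlip cur i) N
      = pvNeighborE N cur (pvSeqOf cur) (pvCorr (pvSeqOf cur) N) i := by
  have hN0 : 0 < N := by omega
  set x : Int := PySem.List.pyGetD cur i 0 with hx
  set v : Int := PySem.Int.bxor x 1 with hv
  have hflip : pvFlip cur i = cur.set i.toNat v := by
    unfold pvFlip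
    rw [PySem.List.pySetD_of_nonneg (h := hi0)]
  have hgx : x = cur.getD i.toNat 0 := by
    rw [hx, PySem.List.pyGetD_eq_getElem _ _ hi0 (by omega)]
    rw [List.getD_eq_getElem _ _ (by omega)]
  -- A side as Finset sum over the flipped sequence
  have hA : calculate_energy (pvFlip cur i) N
      = ∑ m ∈ Finset.range (N.toNat - 1),
          (pvCk ((pvSeqOf cur).set i.toNat (2 * v - 1)) N.toNat (m + 1)) ^ 2 := by
    rw [hflip, pv_calc_eq _ N (by simpa using hlen)]
    have : pvSeqOf (cur.set i.toNat v) = (pvSeqOf cur).set i.toNat (2 * v - 1) := by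
      unfold pvSeqOf; rw [List.map_set]
    rw [this]
  rw [hA]
  -- B side
  unfold pvNeighborE
  rw [PySem.List.foldl_add, PySem.List.pyRange_one, List.map_map]
  rw [show (N - 1 - 0).toNat = N.toNat - 1 from by omega, zero_add, list_range_sum]
  apply Finset.sum_congr rfl
  intro m hm
  simp only [Finset.mem_range] at hm
  simp only [Function.comp_apply, zero_add]
  set u : List Int := pvSeqOf cur with hu
  have hulen : u.length = cur.length := by rw [hu]; unfold pvSeqOf; simp
  rw [pvCk_set u N.toNat i.toNat (m+1) (2*v-1) (by omega) (by omega) (by omega)]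
  rw [pvCorr_getD u N m (by omega)]
  have hcond1 : ((i + ((m:Int) + 1) < N)) ↔ (i.toNat + (m+1) < N.toNat) := by omega
  have hcond2 : ((0:Int) ≤ i - ((m:Int) + 1)) ↔ ((m+1) ≤ i.toNat) := by omega
  have hd : 2 * v - 1 - u.getD i.toNat 0 = 2 * (v - x) := by
    rw [hu, pvSeq_getD cur i.toNat (by omega), ← hgx]; ring
  have hw1 : (if i + ((m:Int) + 1) < N then PySem.List.pyGetD u (i + ((m:Int) + 1)) 0 else 0)
      = (if i.toNat + (m+1) < N.toNat then u.getD (i.toNat + (m+1)) 0 else 0) := by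
    by_cases hc : i.toNat + (m+1) < N.toNat
    · rw [if_pos (hcond1.mpr hc), if_pos hc]
      rw [show i + ((m:Int) + 1) = ((i.toNat + (m+1) : ℕ) : Int) from by omega]
      rw [PySem.List.pyGetD_natCast]
    · rw [if_neg (fun h => hc (hcond1.mp h)), if_neg hc]
  have hw2 : (if (0:Int) ≤ i - ((m:Int) + 1) then PySem.List.pyGetD u (i - ((m:Int) + 1)) 0 else 0)
      = (if (m+1) ≤ i.toNat then u.getD (i.toNat - (m+1)) 0 else 0) := by
    by_cases hc : (m+1) ≤ i.toNat
    · rw [if_pos (hcond2.mpr hc), if_pos hc]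
      rw [show i - ((m:Int) + 1) = ((i.toNat - (m+1) : ℕ) : Int) from by omega]
      rw [PySem.List.pyGetD_natCast]
    · rw [if_neg (fun h => hc (hcond2.mp h)), if_neg hc]
  rw [hw1, hw2, hd]
  ring
theorem pv_energy_base (s : List Int) (N : Int) (hlen : N ≤ (s.length : Int)) :
    calculate_energy s N = ((pvCorr (pvSeqOf s) N).map (fun c => c * c)).sum := by
  rw [pv_calc_eq s N hlen]
  unfold pvCorr
  rw [List.map_map, PySem.List.pyRange_one, List.map_map]
  by_cases hN : 0 ≤ N
  · rw [show (N - 1).toNat = N.toNat - 1 from by omega, list_range_sum]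
    apply Finset.sum_congr rfl
    intro m hm
    simp only [Function.comp_apply]
    rw [show ((1 : Int) + (m : ℕ)) = (((m + 1 : ℕ) : Int)) from by push_cast; ring]
    rw [pvMapSum_eq (pvSeqOf s) N _ (by positivity) hN]
    norm_num
    ring
  · rw [show (N - 1).toNat = 0 from by omega]
    have : N.toNat - 1 = 0 := by omega
    simp [this]
def pvRel (cur : List Int) (a : Option (List Int) × Option Int × Int) (b : Int × Option Int) : Prop :=
  b.1 = a.2.2 ∧ b.2 = a.2.1 ∧
    ((a.1 = none ∧ a.2.1 = none ∧ a.2.2 = -1) ∨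
     (a.1 = some (pvFlip cur a.2.2) ∧ (∃ e, a.2.1 = some e) ∧ 0 ≤ a.2.2))
theorem pvInner_eq (N : Int) (cur seq C : List Int) (bestE : Int) (tabu : List Int)
    (hE : ∀ i : Int, 0 ≤ i → i < N →
      calculate_energy (pvFlip cur i) N = pvNeighborE N cur seq C i) :
    pvRel cur (pvInnerA N cur bestE tabu) (pvInnerB N cur seq C bestE tabu) := by
  unfold pvInnerA pvInnerB
  have main : ∀ (l : List Int), (∀ i ∈ l, 0 ≤ i ∧ i < N) →
      ∀ (a : Option (List Int) × Option Int × Int) (b : Int × Option Int), pvRel cur a b →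
      pvRel cur
        (l.foldl (fun acc i =>
          let cur' := pvFlip cur i
          let ne := calculate_energy cur' N
          let is_tabu := tabu.contains i
          let is_asp := decide (ne < bestE)
          if !is_tabu || is_asp then
            if (match acc.2.1 with | none => true | some e => decide (ne < e)) then
              (some cur', some ne, i)
            else acc
          else acc) a)
        (l.foldl (fun acc i =>
          let e := pvNeighborE N cur seq C i
          if !(tabu.contains i) || decide (e < bestE) then
            if (match acc.2 with | none => true | some e0 => decide (e < e0)) then (i, some e)
            else acc
          else acc) b) := by
    intro l
    induction l with
    | nil => intro _ a b h; exact h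
    | cons i t ih =>
      intro hmem a b hab
      simp only [List.foldl_cons]
      apply ih (fun j hj => hmem j (List.mem_cons_of_mem _ hj))
      obtain ⟨hi0, hiN⟩ := hmem i (List.mem_cons_self)
      obtain ⟨h1, h2, h3⟩ := hab
      have he : calculate_energy (pvFlip cur i) N = pvNeighborE N cur seq C i := hE i hi0 hiN
      simp only [← he, ← h2]
      by_cases hc1 : (!tabu.contains i || decide (calculate_energy (pvFlip cur i) N < bestE)) = true
      · rw [if_pos hc1, if_pos hc1]
        by_cases hc2 : (match b.2 with | none => true | some e => decide (calculate_energy (pvFlip cur i) N < e)) = true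
        · rw [if_pos hc2, if_pos hc2]
          exact ⟨rfl, rfl, Or.inr ⟨rfl, ⟨_, rfl⟩, hi0⟩⟩
        · rw [if_neg hc2, if_neg hc2]
          exact ⟨h1, h2, h3⟩
      · rw [if_neg hc1, if_neg hc1]
        exact ⟨h1, h2, h3⟩
  apply main
  · intro i hi
    rw [PySem.List.mem_pyRange_one] at hi
    exact hi
  · exact ⟨rfl, rfl, Or.inl ⟨rfl, rfl, rfl⟩⟩
def pvInv (N : Int) (n : ℕ) (a : List Int × List Int × Int × List Int)
    (b : List Int × List Int × List Int × List Int × Int × List Int) : Prop :=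
  b.1 = a.1 ∧ b.2.1 = a.2.1 ∧ b.2.2.1 = pvSeqOf a.1 ∧ b.2.2.2.1 = pvCorr (pvSeqOf a.1) N ∧
  b.2.2.2.2.1 = a.2.2.1 ∧ b.2.2.2.2.2 = a.2.2.2 ∧ a.1.length = n
theorem pvFlip_length (cur : List Int) (i : Int) : (pvFlip cur i).length = cur.length := by
  unfold pvFlip
  exact PySem.List.length_pySetD _ _ _
theorem pv_outer_aux (N : Int) (n : ℕ) (hlen : N ≤ (n : Int)) (tabu_tenure : Int)
    (l : List Int) :
    ∀ a b, pvInv N n a b →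
    pvInv N n
      (l.foldl (fun st _ =>
        let cur := st.1
        let best := st.2.1
        let bestE := st.2.2.1
        let tabu := st.2.2.2
        let r := pvInnerA N cur bestE tabu
        match r.1, r.2.1 with
        | some nb, some lbe =>
            let best2 := if lbe < bestE then nb else best
            let bestE2 := if lbe < bestE then lbe else bestE
            let tabu2 := tabu ++ [r.2.2]
            let tabu3 := if tabu_tenure < (tabu2.length : Int) then tabu2.tail else tabu2
            (nb, best2, bestE2, tabu3)
        | _, _ => st) a)
      (l.foldl (fun st _ =>
        let cur := st.1
        let best := st.2.1
        let seq := st.2.2.1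
        let C := st.2.2.2.1
        let bestE := st.2.2.2.2.1
        let tabu := st.2.2.2.2.2
        let r := pvInnerB N cur seq C bestE tabu
        if r.1 ≠ -1 then
          match r.2 with
          | some lbe =>
              let cur2 := pvFlip cur r.1
              let seq2 := pvSeqOf cur2
              let C2 := pvCorr seq2 N
              let best2 := if lbe < bestE then cur2 else best
              let bestE2 := if lbe < bestE then lbe else bestE
              let tabu2 := tabu ++ [r.1]
              let tabu3 := if tabu_tenure < (tabu2.length : Int) then tabu2.tail else tabu2
              (cur2, best2, seq2, C2, bestE2, tabu3)
          | none => st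
        else st) b) := by
  induction l with
  | nil => intro a b h; exact h
  | cons x t ih =>
    intro a b hab
    simp only [List.foldl_cons]
    apply ih
    obtain ⟨hb1, hb2, hseq, hC, hbe, htb, hn⟩ := hab
    have hE : ∀ i : Int, 0 ≤ i → i < N →
        calculate_energy (pvFlip a.1 i) N
          = pvNeighborE N a.1 (pvSeqOf a.1) (pvCorr (pvSeqOf a.1) N) i := by
      intro i h0 hN
      exact pv_energy_flip N a.1 (by omega) i h0 hN
    have hrel := pvInner_eq N a.1 (pvSeqOf a.1) (pvCorr (pvSeqOf a.1) N) a.2.2.1 a.2.2.2 hE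
    simp only [hb1, hb2, hseq, hC, hbe, htb]
    set r := pvInnerA N a.1 a.2.2.1 a.2.2.2 with hr
    set rB := pvInnerB N a.1 (pvSeqOf a.1) (pvCorr (pvSeqOf a.1) N) a.2.2.1 a.2.2.2 with hrB
    obtain ⟨g1, g2, hcase⟩ := hrel
    rcases hcase with ⟨e1, e2, e3⟩ | ⟨f1, ⟨e, f2⟩, f3⟩
    · rw [e1, e2]
      have : rB.1 = -1 := by rw [g1, e3]
      rw [this]
      simp only [ne_eq, not_true_eq_false, if_false]
      exact ⟨hb1, hb2, hseq, hC, hbe, htb, hn⟩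
    · have hrB2 : rB.2 = some e := by rw [g2, f2]
      have hpos : r.2.2 ≠ -1 := by omega
      rw [f1, f2, g1, hrB2, if_pos hpos]
      refine ⟨rfl, rfl, rfl, rfl, rfl, rfl, ?_⟩
      rw [pvFlip_length]; exact hn
theorem pv_outer (N : Int) (s : List Int) (max_iters tabu_tenure : Int)
    (hlen : N ≤ (s.length : Int)) :
    tabu_search N s max_iters tabu_tenure = tabu_search_alt N s max_iters tabu_tenure := by
  unfold tabu_search tabu_search_alt
  have h := pv_outer_aux N s.length hlen tabu_tenure (PySem.List.pyRange 0 max_iters 1)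
    (s, s, calculate_energy s N, ([] : List Int))
    (s, s, pvSeqOf s, pvCorr (pvSeqOf s) N,
      ((pvCorr (pvSeqOf s) N).map (fun c => c * c)).sum, ([] : List Int))
    ⟨rfl, rfl, rfl, rfl, (pv_energy_base s N hlen).symm, rfl, rfl⟩
  exact (h.2.1).symm

-- ===== VERDICT (by name: the statement is the Claim_ definition above) =====
theorem tabu_search_spec : Claim_equal_tabu_search := by
  intro N s max_iters tabu_tenure _ hpre
  unfold Spec_tabu_search
  exact pv_outer N s max_iters tabu_tenure hpre
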